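-- pv_equiv track=rewrite | github.com/gidoUninova/nova-school-of-science-and-technology-novaas | files/model/model_converter.py | transform_path
-- ===== SOURCE A (Python) =====
-- def transform_path(input_string):
--     parts = input_string.split(".")
--     result = []
--
--     for i, part in enumerate(parts):
--         if part.isdigit() and i > 0:
--             # Convert number to index on the previous string
--             prev = result.pop()
--             result.append(f"{prev}[{part}]")
--         else:
--             result.append(part)
--
--     return ".".join(result)
-- ===== SOURCE B (Python) =====
-- def transform_path(input_string):
--     out = ""
--     rest = input_string
--     while True:
--         i = rest.rfind(".")
--         if i == -1:
--             return rest + out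
--         tail = rest[i + 1:]
--         out = (f"[{tail}]" if tail.isdigit() else f".{tail}") + out
--         rest = rest[:i]
-- ===== Notes on version B (the rewrite author's own statement) =====
-- stated objective: alternative
-- what changed: Instead of splitting into a token list and doing a left-to-right pass with pop/re-append and a final join, B never builds a token list: it repeatedly peels the LAST segment off the remaining string with str.rfind and slicing, prepending each segment (bracketed if a digit run, dotted otherwise) to the output, i.e. right-to-left, building the result back-to-front.
import Mathlib
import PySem

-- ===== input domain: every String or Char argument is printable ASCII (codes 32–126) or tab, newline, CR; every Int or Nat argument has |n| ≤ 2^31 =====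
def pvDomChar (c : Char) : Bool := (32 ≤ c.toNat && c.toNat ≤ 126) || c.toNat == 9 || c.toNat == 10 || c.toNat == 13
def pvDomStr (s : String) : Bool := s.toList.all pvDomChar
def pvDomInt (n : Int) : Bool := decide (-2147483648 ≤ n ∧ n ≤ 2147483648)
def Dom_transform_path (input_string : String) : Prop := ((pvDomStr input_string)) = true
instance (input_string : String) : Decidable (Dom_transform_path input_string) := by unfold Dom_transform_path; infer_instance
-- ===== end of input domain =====

-- B never builds a token list: it peels the LAST segment off the remaining string with str.rfind and slicing,
-- building the output back-to-front (right-to-left), instead of A's split + left-to-right pass with pop/re-append + join.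
-- ===== PORT A =====
-- the for-loop over enumerate(parts) with the mutable list `result` (strings handled as List Char via PySem.Chars, exact on the ASCII domain)
def pvALoop : List (List Char) → Nat → List (List Char) → List (List Char)
  | [], _, res => res
  | p :: ps, i, res =>
    if PySem.Chars.strIsdigit p && decide (0 < i) then
      match PySem.List.pop? res with                      -- result.pop()
      | some (prev, rest) => pvALoop ps (i + 1) (rest ++ [prev ++ '[' :: (p ++ [']'])])
      | none => pvALoop ps (i + 1) res                    -- unreachable: when i > 0, result is nonempty
    else
      pvALoop ps (i + 1) (res ++ [p])

def transform_path (input_string : String) : String :=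
  String.ofList (PySem.Chars.join ['.'] (pvALoop (PySem.Chars.splitOn input_string.toList ['.']) 0 []))

-- ===== PORT B =====
-- termination helper for the B loop: when rfind does not return -1 it is a valid index with a '.' there
theorem pv_rfind_go_spec (s : List Char) : ∀ (j : Nat),
    (PySem.Chars.rfind.go s ['.'] j = -1 ∧ ∀ k ≤ j, ¬ ['.'].isPrefixOf (s.drop k) = true) ∨
    (∃ m : Nat, PySem.Chars.rfind.go s ['.'] j = m ∧ m ≤ j ∧ ['.'].isPrefixOf (s.drop m) = true ∧
      ∀ k, m < k → k ≤ j → ¬ ['.'].isPrefixOf (s.drop k) = true) := by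
  intro j
  induction j with
  | zero =>
    rw [PySem.Chars.rfind.go]
    by_cases h : ['.'].isPrefixOf s = true
    · right; exact ⟨0, by simp [h], le_refl 0, by simpa using h, by omega⟩
    · left
      refine ⟨by simp [h], ?_⟩
      intro k hk; interval_cases k; simpa using h
  | succ j ih =>
    have hgo : PySem.Chars.rfind.go s ['.'] (j+1) =
        if ['.'].isPrefixOf (s.drop (j+1)) then ((j : Int)+1) else PySem.Chars.rfind.go s ['.'] j := by
      rw [PySem.Chars.rfind.go]; push_cast; ring_nf
    by_cases h : ['.'].isPrefixOf (s.drop (j+1)) = true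
    · right
      exact ⟨j+1, by rw [hgo, if_pos h]; push_cast; ring, le_refl _, h, by omega⟩
    · rw [hgo, if_neg h]
      rcases ih with ⟨h1, h2⟩ | ⟨m, h1, h2, h3, h4⟩
      · left
        refine ⟨h1, ?_⟩
        intro k hk
        rcases Nat.lt_or_ge k (j+1) with hlt | hge
        · exact h2 k (by omega)
        · have : k = j + 1 := by omega
          subst this; exact h
      · right
        refine ⟨m, h1, by omega, h3, ?_⟩
        intro k hk1 hk2
        rcases Nat.lt_or_ge k (j+1) with hlt | hge
        · exact h4 k hk1 (by omega)
        · have : k = j + 1 := by omega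
          subst this; exact h

theorem pv_prefix_dot_iff (l : List Char) : ['.'].isPrefixOf l = true ↔ ∃ t, l = '.' :: t := by
  cases l with
  | nil => simp [List.isPrefixOf]
  | cons c t =>
    simp only [List.isPrefixOf, Bool.and_true, beq_iff_eq, List.cons.injEq]
    constructor
    · intro h; exact ⟨t, h.symm, rfl⟩
    · rintro ⟨t', h1, h2⟩; cases h2; exact h1.symm

theorem pv_rfind_found (s : List Char) (h : PySem.Chars.rfind s ['.'] ≠ -1) :
    0 ≤ PySem.Chars.rfind s ['.'] ∧ (PySem.Chars.rfind s ['.']).toNat < s.length ∧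
      ['.'].isPrefixOf (s.drop (PySem.Chars.rfind s ['.']).toNat) = true := by
  rcases pv_rfind_go_spec s s.length with ⟨h1, _⟩ | ⟨m, h1, h2, h3, _⟩
  · exact absurd h1 h
  · rw [PySem.Chars.rfind] at *
    rw [h1]
    rcases (pv_prefix_dot_iff _).1 h3 with ⟨t, ht⟩
    have hm : m < s.length := by
      by_contra hge
      have : s.drop m = [] := List.drop_eq_nil_of_le (by omega)
      rw [this] at ht; cases ht
    exact ⟨by positivity, by simpa using hm, by simpa using h3⟩

-- the while-True loop of B: `rest` still to process, `out` the already-built suffix of the answer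
def pvBGo (rest : List Char) (out : List Char) : List Char :=
  let i := PySem.Chars.rfind rest ['.']                                  -- i = rest.rfind(sep)
  if hi : i = -1 then rest ++ out                                        -- return rest + out
  else
    let tail := PySem.List.slice rest (some (i+1)) none                  -- tail = rest[i+1:]
    pvBGo (PySem.List.slice rest none (some i))                          -- rest = rest[:i]
      ((if PySem.Chars.strIsdigit tail then '[' :: (tail ++ [']']) else '.' :: tail) ++ out)
termination_by rest.length
decreasing_by
  rcases pv_rfind_found rest hi with ⟨h0, hlt, -⟩
  rw [PySem.List.slice_to rest h0]
  simp only [List.length_take]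
  omega

def transform_path_alt (input_string : String) : String :=
  String.ofList (pvBGo input_string.toList [])

-- ===== PRECONDITION & SPEC =====
def Spec_transform_path (input_string : String) (out : String) : Prop := out = transform_path_alt input_string
instance (input_string : String) (out : String) : Decidable (Spec_transform_path input_string out) := by unfold Spec_transform_path; infer_instance

-- ===== CLAIM (what is proved, stated in full; the proofs are below) =====
def Claim_equal_transform_path : Prop := ∀ (input_string : String), Dom_transform_path input_string → Spec_transform_path input_string (transform_path input_string)

-- ===== LEMMAS AND PROOFS =====

-- canonical value: fold over the tail segments, appending each in bracket or dot form
def pvCanon : List (List Char) → List Char → List Char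
  | [], acc => acc
  | p :: ps, acc =>
      pvCanon ps (acc ++ (if PySem.Chars.strIsdigit p then '[' :: (p ++ [']']) else '.' :: p))

-- a simple structural recursion equal to str.split(".")
def pvSplit : List Char → List (List Char)
  | [] => [[]]
  | c :: rest => if c = '.' then [] :: pvSplit rest else (pvSplit rest).modifyHead (c :: ·)

theorem pv_split_ne_nil (s : List Char) : pvSplit s ≠ [] := by
  induction s with
  | nil => simp [pvSplit]
  | cons c rest ih =>
    by_cases h : c = '.'
    · simp [pvSplit, h]
    · simp only [pvSplit, if_neg h]
      cases hsp : pvSplit rest with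
      | nil => exact absurd hsp ih
      | cons a l => simp [List.modifyHead]

theorem pv_split_no_dot (s : List Char) : ∀ p ∈ pvSplit s, '.' ∉ p := by
  induction s with
  | nil => simp [pvSplit]
  | cons c rest ih =>
    by_cases h : c = '.'
    · simp only [pvSplit, if_pos h, List.mem_cons]
      rintro p (rfl | hp)
      · simp
      · exact ih p hp
    · simp only [pvSplit, if_neg h]
      cases hsp : pvSplit rest with
      | nil => exact absurd hsp (pv_split_ne_nil rest)
      | cons a l =>
        simp only [List.modifyHead, List.mem_cons]
        rintro p (rfl | hp)
        · have := ih a (by rw [hsp]; exact List.mem_cons_self)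
          simp only [List.mem_cons]
          rintro (rfl | hmem)
          · exact h rfl
          · exact this hmem
        · exact ih p (by rw [hsp]; exact List.mem_cons_of_mem _ hp)

theorem pv_join_split (s : List Char) : PySem.Chars.join ['.'] (pvSplit s) = s := by
  induction s with
  | nil => simp [pvSplit, PySem.Chars.join, List.intercalate]
  | cons c rest ih =>
    by_cases h : c = '.'
    · subst h
      rw [show pvSplit ('.' :: rest) = [] :: pvSplit rest from by simp [pvSplit]]
      cases hsp : pvSplit rest with
      | nil => exact absurd hsp (pv_split_ne_nil rest)
      | cons a l =>
        rw [PySem.Chars.join_cons_cons]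
        rw [hsp] at ih; rw [ih]; rfl
    · simp only [pvSplit, if_neg h]
      cases hsp : pvSplit rest with
      | nil => exact absurd hsp (pv_split_ne_nil rest)
      | cons a l =>
        rw [hsp] at ih
        simp only [List.modifyHead]
        cases l with
        | nil =>
          rw [PySem.Chars.join_singleton] at *
          rw [ih]
        | cons b m =>
          rw [PySem.Chars.join_cons_cons] at *
          rw [← ih]; simp
-- splitOn with separator "." computes pvSplit
theorem pv_splitOn_go_eq (sep : List Char) (hsep : sep = ['.']) :
    ∀ (fuel : Nat) (l cur : List Char) (acc : List (List Char)), l.length ≤ fuel →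
      PySem.Chars.splitOn.go sep fuel l cur acc =
        acc.reverse ++ (pvSplit l).modifyHead (cur.reverse ++ ·) := by
  subst hsep
  intro fuel
  induction fuel with
  | zero =>
    intro l cur acc hl
    have : l = [] := List.eq_nil_of_length_eq_zero (by omega)
    subst this
    rw [PySem.Chars.splitOn.go]
    simp [pvSplit, List.modifyHead]
  | succ fuel ih =>
    intro l cur acc hl
    cases l with
    | nil =>
      rw [PySem.Chars.splitOn.go]
      · simp [pvSplit, List.modifyHead]
      · omega
    | cons c rest =>
      rw [PySem.Chars.splitOn.go]
      by_cases h : c = '.'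
      · subst h
        rw [if_pos (by simp [List.isPrefixOf])]
        rw [ih _ _ _ (by simp at hl ⊢; omega)]
        rw [show pvSplit ('.' :: rest) = [] :: pvSplit rest from by simp [pvSplit]]
        cases hsp : pvSplit rest with
        | nil => exact absurd hsp (pv_split_ne_nil rest)
        | cons a m => simp [List.modifyHead, hsp]
      · rw [if_neg (by simp [List.isPrefixOf]; exact fun hh => h hh.symm)]
        rw [ih _ _ _ (by simp at hl ⊢; omega)]
        simp only [pvSplit, if_neg h]
        cases hsp : pvSplit rest with
        | nil => exact absurd hsp (pv_split_ne_nil rest)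
        | cons a m => simp [List.modifyHead]

theorem pv_splitOn_eq (s : List Char) : PySem.Chars.splitOn s ['.'] = pvSplit s := by
  rw [PySem.Chars.splitOn, pv_splitOn_go_eq ['.'] rfl (s.length + 1) s [] [] (by omega)]
  cases hsp : pvSplit s with
  | nil => exact absurd hsp (pv_split_ne_nil s)
  | cons a l => simp [List.modifyHead]

-- ---- A-side: the join of A's loop equals pvCanon ----
theorem pv_join_mod_last (xs : List (List Char)) (h : xs ≠ []) (y : List Char) :
    PySem.Chars.join ['.'] (xs.dropLast ++ [xs.getLast h ++ y]) =
      PySem.Chars.join ['.'] xs ++ y := by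
  induction xs with
  | nil => exact absurd rfl h
  | cons a l ih =>
    cases l with
    | nil => simp [PySem.Chars.join, List.intercalate]
    | cons b m =>
      have hne : b :: m ≠ [] := by simp
      have : (a :: b :: m).dropLast ++ [(a :: b :: m).getLast h ++ y]
          = a :: ((b :: m).dropLast ++ [(b :: m).getLast hne ++ y]) := by
        simp [List.dropLast, List.getLast]
      rw [this]
      have htail : (b :: m).dropLast ++ [(b :: m).getLast hne ++ y] ≠ [] := by simp
      obtain ⟨c, cs, hc⟩ := List.exists_cons_of_ne_nil htail
      rw [hc, PySem.Chars.join_cons_cons, ← hc, ih hne, PySem.Chars.join_cons_cons]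
      simp [List.append_assoc]

theorem pv_join_append_single (xs : List (List Char)) (h : xs ≠ []) (y : List Char) :
    PySem.Chars.join ['.'] (xs ++ [y]) = PySem.Chars.join ['.'] xs ++ '.' :: y := by
  induction xs with
  | nil => exact absurd rfl h
  | cons a l ih =>
    cases l with
    | nil => simp [PySem.Chars.join, List.intercalate]
    | cons b m =>
      rw [List.cons_append, List.cons_append, PySem.Chars.join_cons_cons,
        PySem.Chars.join_cons_cons, ← List.cons_append, ih (by simp)]
      simp [List.append_assoc]

theorem pv_pop_ne_nil {α : Type} (res : List α) (h : res ≠ []) :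
    PySem.List.pop? res = some (res.getLast h, res.dropLast) := by
  conv_lhs => rw [← List.dropLast_append_getLast h]
  exact PySem.List.pop?_last _ _

theorem pv_loop_eq (ps : List (List Char)) : ∀ (i : Nat) (res : List (List Char)),
    res ≠ [] → 1 ≤ i →
    PySem.Chars.join ['.'] (pvALoop ps i res) = pvCanon ps (PySem.Chars.join ['.'] res) := by
  induction ps with
  | nil => intro i res _ _; rfl
  | cons p ps ih =>
    intro i res hres hi
    by_cases hd : PySem.Chars.strIsdigit p = true
    · have hpos : 0 < i := hi
      rw [pvALoop, if_pos (by simp [hd, hpos])]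
      rw [pv_pop_ne_nil res hres]
      rw [ih (i + 1) _ (by simp) (by omega)]
      have heq := pv_join_mod_last res hres ('[' :: (p ++ [']']))
      rw [heq, pvCanon, if_pos hd]
    · rw [pvALoop, if_neg (by simp [hd])]
      rw [ih (i + 1) _ (by simp) (by omega), pv_join_append_single res hres]
      rw [pvCanon, if_neg hd]

-- ---- B-side lemmas ----
theorem pv_rfind_none (s : List Char) (h : '.' ∉ s) : PySem.Chars.rfind s ['.'] = -1 := by
  rcases pv_rfind_go_spec s s.length with ⟨h1, _⟩ | ⟨m, h1, _, h3, _⟩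
  · exact h1
  · rcases (pv_prefix_dot_iff _).1 h3 with ⟨t, ht⟩
    have : '.' ∈ s.drop m := by rw [ht]; exact List.mem_cons_self
    exact absurd (List.mem_of_mem_drop this) h

theorem pv_rfind_append (u p : List Char) (hp : '.' ∉ p) :
    PySem.Chars.rfind (u ++ '.' :: p) ['.'] = (u.length : Int) := by
  set s := u ++ '.' :: p with hs
  have hPu : ['.'].isPrefixOf (s.drop u.length) = true := by
    rw [hs, List.drop_left]
    exact (pv_prefix_dot_iff _).2 ⟨p, rfl⟩
  have hlen : s.length = u.length + p.length + 1 := by simp [hs]; omega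
  have hnotP : ∀ k, u.length < k → ¬ ['.'].isPrefixOf (s.drop k) = true := by
    intro k hk hP
    rcases (pv_prefix_dot_iff _).1 hP with ⟨t, ht⟩
    have hdk : s.drop k = p.drop (k - u.length - 1) := by
      rw [hs, List.drop_append, List.drop_eq_nil_of_le (by omega : u.length ≤ k)]
      rw [show k - u.length = (k - u.length - 1) + 1 by omega, List.drop_succ_cons]
      simp
    have : '.' ∈ p := by
      have : '.' ∈ s.drop k := by rw [ht]; exact List.mem_cons_self
      rw [hdk] at this
      exact List.mem_of_mem_drop this
    exact hp this
  rcases pv_rfind_go_spec s s.length with ⟨h1, h2⟩ | ⟨m, h1, h2, h3, h4⟩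
  · exact absurd hPu (h2 u.length (by omega))
  · rw [PySem.Chars.rfind] at *
    rw [h1]
    have : m = u.length := by
      rcases Nat.lt_trichotomy m u.length with hlt | heq | hgt
      · exact absurd hPu (h4 u.length hlt (by omega))
      · exact heq
      · exact absurd h3 (hnotP m hgt)
    rw [this]

theorem pv_canon_append (ts : List (List Char)) : ∀ (p : List Char) (acc : List Char),
    pvCanon (ts ++ [p]) acc =
      pvCanon ts acc ++ (if PySem.Chars.strIsdigit p then '[' :: (p ++ [']']) else '.' :: p) := by
  induction ts with
  | nil => intro p acc; simp [pvCanon]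
  | cons q qs ih => intro p acc; simp only [List.cons_append, pvCanon]; rw [ih]

theorem pvBGo_eq (t : List (List Char)) : ∀ (h : List Char), '.' ∉ h → (∀ p ∈ t, '.' ∉ p) →
    ∀ out, pvBGo (PySem.Chars.join ['.'] (h :: t)) out = pvCanon t h ++ out := by
  induction t using List.reverseRecOn with
  | nil =>
    intro h hh _ out
    rw [PySem.Chars.join_singleton, pvBGo.eq_def]
    simp only [pv_rfind_none h hh, reduceDIte]
    rfl
  | append_singleton ts p ih =>
    intro h hh hts out
    have hp : '.' ∉ p := hts p (by simp)
    have hjoin : PySem.Chars.join ['.'] (h :: (ts ++ [p]))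
        = PySem.Chars.join ['.'] (h :: ts) ++ '.' :: p := by
      have := pv_join_append_single (h :: ts) (by simp) p
      simpa using this
    set u := PySem.Chars.join ['.'] (h :: ts) with hu
    rw [hjoin, pvBGo.eq_def]
    have hrf : PySem.Chars.rfind (u ++ '.' :: p) ['.'] = (u.length : Int) := pv_rfind_append u p hp
    simp only [hrf]
    rw [dif_neg (by omega)]
    have htail : PySem.List.slice (u ++ '.' :: p) (some ((u.length : Int) + 1)) none = p := by
      rw [show ((u.length : Int) + 1) = ((u.length + 1 : Nat) : Int) by push_cast; ring]
      rw [PySem.List.slice_from _ (by positivity)]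
      rw [Int.toNat_natCast, List.drop_append, List.drop_eq_nil_of_le (by omega : u.length ≤ u.length + 1)]
      rw [show u.length + 1 - u.length = 0 + 1 by omega, List.drop_succ_cons]
      simp
    have hhead : PySem.List.slice (u ++ '.' :: p) none (some (u.length : Int)) = u := by
      rw [PySem.List.slice_to _ (by positivity)]
      simp
    rw [htail, hhead]
    rw [ih h hh (fun q hq => hts q (List.mem_append_left _ hq)) _]
    rw [pv_canon_append]
    simp [List.append_assoc]

-- ===== VERDICT (by name: the statement is the Claim_ definition above) =====
theorem transform_path_spec : Claim_equal_transform_path := by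
  intro s _
  unfold Spec_transform_path transform_path transform_path_alt
  rw [pv_splitOn_eq]
  cases hsp : pvSplit s.toList with
  | nil => exact absurd hsp (pv_split_ne_nil _)
  | cons h t =>
    rw [pvALoop, if_neg (by simp)]
    simp only [List.nil_append]
    rw [pv_loop_eq t (0 + 1) [h] (by simp) (by omega)]
    rw [PySem.Chars.join_singleton]
    have hjs : s.toList = PySem.Chars.join ['.'] (h :: t) := by
      rw [← hsp, pv_join_split]
    rw [hjs]
    have hnd := pv_split_no_dot s.toList
    rw [hsp] at hnd
    rw [pvBGo_eq t h (hnd h List.mem_cons_self) (fun p hp => hnd p (List.mem_cons_of_mem _ hp)) []]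
    simp
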